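-- pv_equiv track=rewrite | github.com/zak799/altifier | altifier/altifier/__init__.py | alty_text
-- ===== SOURCE A (Python) =====
-- def alty_text(text):
--     output = []
--     switchy = True
--     for char in text:
--         if char.isalpha():
--             if switchy:
--                 output.append(char.upper())
--             else:
--                 output.append(char.lower())
--             switchy = not switchy
--         else:
--             output.append(char)
--     return ''.join(output)
-- ===== SOURCE B (Python) =====
-- def alty_text(text):
--     cased = [c.upper() if i % 2 == 0 else c.lower()
--              for i, c in enumerate(ch for ch in text if ch.isalpha())]
--     it = iter(cased)
--     return ''.join(next(it) if c.isalpha() else c for c in text)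
-- ===== Notes on version B (the rewrite author's own statement) =====
-- stated objective: alternative
-- what changed: Replaces the single stateful loop carrying a case-toggle flag with two stateless passes: first case the filtered letters by index parity, then reassemble over the full text consuming that sequence.
import Mathlib
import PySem

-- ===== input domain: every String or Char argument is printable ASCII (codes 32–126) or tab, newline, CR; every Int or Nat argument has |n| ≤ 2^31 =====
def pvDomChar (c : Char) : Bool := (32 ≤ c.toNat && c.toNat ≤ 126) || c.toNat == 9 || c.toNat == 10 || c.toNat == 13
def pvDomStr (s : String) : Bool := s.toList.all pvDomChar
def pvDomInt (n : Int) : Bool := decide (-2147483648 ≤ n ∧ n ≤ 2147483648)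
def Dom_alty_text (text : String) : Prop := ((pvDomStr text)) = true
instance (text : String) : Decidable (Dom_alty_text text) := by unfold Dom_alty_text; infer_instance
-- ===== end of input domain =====

-- B alternates case by a different decomposition: a parity pass over the letters alone, then a
-- reassembly pass over the full text; A carries a toggle flag through one stateful loop.

-- ===== PORT A =====
-- the for-loop over text with state (output, switchy), appends in order; ''.join = String.mk
def alty_text (text : String) : String :=
  String.mk (text.toList.foldl
    (fun (st : List Char × Bool) c =>
      if PySem.Chars.isalpha c then
        (st.1 ++ [if st.2 then PySem.Chars.upperChar c else PySem.Chars.lowerChar c], !st.2)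
      else (st.1 ++ [c], st.2))
    ([], true)).1

-- ===== PORT B =====
-- c.upper() if i % 2 == 0 else c.lower()
def pvCase (p : Int × Char) : Char :=
  if PySem.Int.mod p.1 2 = 0 then PySem.Chars.upperChar p.2 else PySem.Chars.lowerChar p.2

-- the reassembly generator: next(it) per alpha char, others copied (an exhausted iterator never
-- occurs: cased holds one entry per alpha char of text)
def pvRebuild : List Char → List Char → List Char
  | [], _ => []
  | c :: cs, it =>
    if PySem.Chars.isalpha c then
      match it with
      | x :: rest => x :: pvRebuild cs rest
      | [] => []
    else c :: pvRebuild cs it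

def alty_text_alt (text : String) : String :=
  String.mk (pvRebuild text.toList
    ((PySem.List.enumerate (text.toList.filter PySem.Chars.isalpha) 0).map pvCase))

-- ===== PRECONDITION & SPEC =====
def Spec_alty_text (text : String) (out : String) : Prop := out = alty_text_alt text
instance (text : String) (out : String) : Decidable (Spec_alty_text text out) := by unfold Spec_alty_text; infer_instance

-- ===== CLAIM (what is proved, stated in full; the proofs are below) =====
def Claim_equal_alty_text : Prop := ∀ (text : String), Dom_alty_text text → Spec_alty_text text (alty_text text)

-- ===== LEMMAS AND PROOFS =====
-- the value A's loop appends after a given tail, as a direct recursion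
def pvGoA : List Char → Bool → List Char
  | [], _ => []
  | c :: cs, sw =>
    if PySem.Chars.isalpha c then
      (if sw then PySem.Chars.upperChar c else PySem.Chars.lowerChar c) :: pvGoA cs (!sw)
    else c :: pvGoA cs sw

theorem pvFoldA (cs : List Char) (out : List Char) (sw : Bool) :
    (cs.foldl
      (fun (st : List Char × Bool) c =>
        if PySem.Chars.isalpha c then
          (st.1 ++ [if st.2 then PySem.Chars.upperChar c else PySem.Chars.lowerChar c], !st.2)
        else (st.1 ++ [c], st.2))
      (out, sw)).1 = out ++ pvGoA cs sw := by
  induction cs generalizing out sw with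
  | nil => simp [pvGoA]
  | cons c cs ih =>
    by_cases h : PySem.Chars.isalpha c <;> simp [pvGoA, h, ih]

theorem pvKey (cs : List Char) (sw : Bool) (s : Int)
    (hs : 0 ≤ s) (hp : s % 2 = 0 ↔ sw = true) :
    pvRebuild cs ((PySem.List.enumerate (cs.filter PySem.Chars.isalpha) s).map pvCase)
      = pvGoA cs sw := by
  induction cs generalizing sw s with
  | nil => simp [pvRebuild, pvGoA]
  | cons c cs ih =>
    by_cases h : PySem.Chars.isalpha c
    · simp only [List.filter_cons, h, if_pos, PySem.List.enumerate_cons, List.map_cons,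
        pvRebuild, pvGoA]
      refine congrArg₂ (· :: ·) ?_ ?_
      · simp only [pvCase, PySem.Int.mod_eq_emod_of_pos (a := s) (by norm_num : (0:Int) < 2)]
        rcases Bool.eq_false_or_eq_true sw with h2 | h2 <;> simp [h2] at hp ⊢ <;> simp [hp]
      · exact ih (!sw) (s + 1) (by omega) (by
          rcases Bool.eq_false_or_eq_true sw with h2 | h2 <;> simp [h2] at hp ⊢ <;> omega)
    · simp only [List.filter_cons, h, pvRebuild, pvGoA, Bool.false_eq_true, if_false]
      exact congrArg (c :: ·) (ih sw s hs hp)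

-- ===== VERDICT (by name: the statement is the Claim_ definition above) =====
theorem alty_text_spec : Claim_equal_alty_text := by
  intro text _
  unfold Spec_alty_text alty_text alty_text_alt
  rw [pvFoldA, pvKey text.toList true 0 (by norm_num) (by norm_num)]
  rfl
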